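-- pv_equiv track=rewrite | github.com/byuccl/bfasst | bfasst/netlist_mapping/structural/automated_block_mapping.py | get_higher_potential_instances
-- ===== SOURCE A (Python) =====
-- def get_higher_potential_instances(potential_instances, higher_potential_instances):
--     """Gets the potential instances with the highest matching wires number"""
--
--     # Getting the max number of matching wires
--     max_num = 0
--     potential_instances_len = len(potential_instances)
--     for i in range(potential_instances_len):
--         matching_wires = potential_instances[i][1]
--         if matching_wires > max_num:
--             max_num = matching_wires
--     # Getting the instances with the max number of matching wires
--     for i in range(potential_instances_len):
--         matching_wires = potential_instances[i][1]
--         if matching_wires == max_num: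
--             higher_potential_instances.append(potential_instances[i])
--
--     return higher_potential_instances
-- ===== SOURCE B (Python) =====
-- def get_higher_potential_instances(potential_instances, higher_potential_instances):
--     """Gets the potential instances with the highest matching wires number (single pass)."""
--     max_num = 0
--     result = []
--     for element in potential_instances:
--         matching_wires = element[1]
--         if matching_wires > max_num:
--             max_num = matching_wires
--             result = [element]
--         elif matching_wires == max_num:
--             result.append(element)
--     higher_potential_instances.extend(result)
--     return higher_potential_instances
-- ===== Notes on version B (the rewrite author's own statement) =====
-- stated objective: alternative
-- what changed: Replaces A's two passes (find max, then rescan collecting matches) with one pass carrying a running max and a tied-elements accumulator, extending the caller's list once at the end.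
import Mathlib
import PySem

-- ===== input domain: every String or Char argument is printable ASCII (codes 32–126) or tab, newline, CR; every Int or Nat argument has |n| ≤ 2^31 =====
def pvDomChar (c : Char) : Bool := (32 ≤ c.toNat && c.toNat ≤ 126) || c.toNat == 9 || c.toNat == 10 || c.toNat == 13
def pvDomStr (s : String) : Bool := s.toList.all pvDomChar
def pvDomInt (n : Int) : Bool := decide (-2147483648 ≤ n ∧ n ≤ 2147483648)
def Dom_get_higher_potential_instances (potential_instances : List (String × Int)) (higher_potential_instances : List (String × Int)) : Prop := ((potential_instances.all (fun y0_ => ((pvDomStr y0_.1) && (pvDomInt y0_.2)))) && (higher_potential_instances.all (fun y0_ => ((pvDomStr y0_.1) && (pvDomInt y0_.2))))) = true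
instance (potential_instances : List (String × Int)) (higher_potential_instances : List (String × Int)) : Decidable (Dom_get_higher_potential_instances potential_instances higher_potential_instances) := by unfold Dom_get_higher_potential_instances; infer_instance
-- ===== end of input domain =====

-- B replaces A's two scans (max first, then rescan for ties) with one scan carrying a
-- running max and a tied-elements accumulator (same O(n); a different decomposition, not claimed faster).
-- Both A and B append to (mutate) higher_potential_instances in Python; the equivalence
-- proved here is about the returned list.

-- ===== PORT A =====
-- A's first loop body: update the running maximum
def pvMaxStep (m : Int) (p : String × Int) : Int := if p.2 > m then p.2 else m
-- A's second loop body: append elements whose count equals max_num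
def pvCollectStep (max_num : Int) (acc : List (String × Int)) (p : String × Int) : List (String × Int) :=
  if p.2 == max_num then acc ++ [p] else acc

def get_higher_potential_instances (potential_instances : List (String × Int)) (higher_potential_instances : List (String × Int)) : List (String × Int) :=
  let max_num := potential_instances.foldl pvMaxStep 0
  potential_instances.foldl (pvCollectStep max_num) higher_potential_instances

-- ===== PORT B =====
-- B's single-loop body: carry (max_num, result); reset result on a strictly greater count,
-- append on a tie
def pvScanStep (s : Int × List (String × Int)) (p : String × Int) : Int × List (String × Int) :=
  if p.2 > s.1 then (p.2, [p])
  else if p.2 == s.1 then (s.1, s.2 ++ [p])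
  else s

def get_higher_potential_instances_alt (potential_instances : List (String × Int)) (higher_potential_instances : List (String × Int)) : List (String × Int) :=
  let st := potential_instances.foldl pvScanStep (0, [])
  higher_potential_instances ++ st.2

-- ===== PRECONDITION & SPEC =====
def Spec_get_higher_potential_instances (potential_instances : List (String × Int)) (higher_potential_instances : List (String × Int)) (out : List (String × Int)) : Prop := out = get_higher_potential_instances_alt potential_instances higher_potential_instances
instance (potential_instances : List (String × Int)) (higher_potential_instances : List (String × Int)) (out : List (String × Int)) : Decidable (Spec_get_higher_potential_instances potential_instances higher_potential_instances out) := by unfold Spec_get_higher_potential_instances; infer_instance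

-- ===== CLAIM (what is proved, stated in full; the proofs are below) =====
def Claim_equal_get_higher_potential_instances : Prop := ∀ (potential_instances : List (String × Int)) (higher_potential_instances : List (String × Int)), Dom_get_higher_potential_instances potential_instances higher_potential_instances → Spec_get_higher_potential_instances potential_instances higher_potential_instances (get_higher_potential_instances potential_instances higher_potential_instances)

-- ===== LEMMAS AND PROOFS =====

-- The running maximum never decreases.
theorem pv_le_foldl_max (xs : List (String × Int)) (m : Int) :
    m ≤ xs.foldl pvMaxStep m := by
  induction xs generalizing m with
  | nil => simp [List.foldl]
  | cons p t ih =>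
    rw [List.foldl_cons]
    refine le_trans ?_ (ih (pvMaxStep m p))
    unfold pvMaxStep; split_ifs with h <;> omega

-- A's second loop collects exactly the elements tied with max_num.
theorem pv_loopA (M : Int) (xs acc : List (String × Int)) :
    xs.foldl (pvCollectStep M) acc = acc ++ xs.filter (fun p => p.2 == M) := by
  induction xs generalizing acc with
  | nil => simp
  | cons p t ih =>
    rw [List.foldl_cons, List.filter_cons]
    by_cases h : p.2 == M
    · have hs : pvCollectStep M acc p = acc ++ [p] := by simp [pvCollectStep, h]
      simp [hs, ih, h]
    · have hs : pvCollectStep M acc p = acc := by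
        simp [pvCollectStep]; intro hc; simp [hc] at h
      simp [hs, ih, h]

-- B's single loop computes A's maximum together with the tied elements.
theorem pv_loopB (xs : List (String × Int)) (m : Int) (res : List (String × Int)) :
    xs.foldl pvScanStep (m, res) =
      (xs.foldl pvMaxStep m,
       (if xs.foldl pvMaxStep m = m then res else []) ++
         xs.filter (fun p => p.2 == xs.foldl pvMaxStep m)) := by
  induction xs generalizing m res with
  | nil => simp
  | cons p t ih =>
    rw [List.foldl_cons, List.foldl_cons, List.filter_cons]
    by_cases h1 : p.2 > m
    · have hs : pvScanStep (m, res) p = (p.2, [p]) := by simp [pvScanStep, h1]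
      have hm : pvMaxStep m p = p.2 := by simp [pvMaxStep, h1]
      have hM : p.2 ≤ t.foldl pvMaxStep p.2 := pv_le_foldl_max t p.2
      have hne : t.foldl pvMaxStep p.2 ≠ m := by omega
      rw [hs, hm, ih]
      by_cases h2 : t.foldl pvMaxStep p.2 = p.2
      · have hb : (p.2 == t.foldl pvMaxStep p.2) = true := by simp [h2]
        simp [h2]
        intro h; exact absurd h (by omega)
      · have hb : (p.2 == t.foldl pvMaxStep p.2) = false := by
          simp; omega
        simp [h2, hne, hb]
    · have hm : pvMaxStep m p = m := by simp [pvMaxStep, h1]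
      have hM : m ≤ t.foldl pvMaxStep m := pv_le_foldl_max t m
      rw [hm]
      by_cases h2 : p.2 == m
      · have hpm : p.2 = m := by simpa [beq_iff_eq] using h2
        have hs : pvScanStep (m, res) p = (m, res ++ [p]) := by
          simp [pvScanStep, h1, h2]
        rw [hs, ih]
        by_cases h3 : t.foldl pvMaxStep m = m
        · have hb : (p.2 == t.foldl pvMaxStep m) = true := by
            simp [hpm, h3]
          simp [h3]
          exact hpm
        · have hb : (p.2 == t.foldl pvMaxStep m) = false := by
            simp; omega
          simp [h3, hb]
      · have hpm : p.2 ≠ m := by simpa [beq_iff_eq] using h2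
        have hs : pvScanStep (m, res) p = (m, res) := by
          simp [pvScanStep, h1, hpm]
        have hb : (p.2 == t.foldl pvMaxStep m) = false := by
          simp; omega
        rw [hs, ih]
        simp [hb]

-- ===== VERDICT (by name: the statement is the Claim_ definition above) =====
theorem get_higher_potential_instances_spec : Claim_equal_get_higher_potential_instances := by
  unfold Claim_equal_get_higher_potential_instances
  intro pi hi _
  unfold Spec_get_higher_potential_instances
  unfold get_higher_potential_instances get_higher_potential_instances_alt
  rw [pv_loopA, pv_loopB]
  simp
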